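-- pv_equiv track=rewrite | github.com/rpbgit/adif-qso-analyzer | src/metrics_analyzer.py | _calculate_hourly_rates
-- ===== SOURCE A (Python) =====
-- from typing import List, Dict, Any
-- from collections import defaultdict
--
-- def _calculate_hourly_rates(qsos: List[Dict[str, Any]]) -> List[Dict[str, Any]]:
--     """
--     Calculate QSO rates for each hour in the log.
--
--     Args:
--         qsos: List of QSO records
--
--     Returns:
--         List of hourly rate dictionaries with hour and qso_count
--     """
--     if not qsos:
--         return []
--
--     # Group QSOs by hour
--     hourly_counts = defaultdict(int)
--
--     for qso in qsos:
--         time_on = qso.get('TIME_ON')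
--         if time_on is not None:
--             # Ensure time_on is int for formatting
--             try:
--                 time_on_int = int(time_on)
--             except Exception:
--                 continue
--             time_str = f"{time_on_int:06d}"
--             hour = int(time_str[:2])
--             hourly_counts[hour] += 1
--
--     # Convert to sorted list
--     hourly_rates = []
--     for hour in sorted(hourly_counts.keys()):
--         hourly_rates.append({
--             'hour': hour,
--             'qso_count': hourly_counts[hour]
--         })
--
--     return hourly_rates
-- ===== SOURCE B (Python) =====
-- from typing import List, Dict, Any
--
--
-- def _hour(time_on) -> "int | None":
--     """Same parsing as the original: int() with try/except, 06d format, first two chars."""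
--     if time_on is None:
--         return None
--     try:
--         t = int(time_on)
--     except Exception:
--         return None
--     return int(f"{t:06d}"[:2])
--
--
-- def _calculate_hourly_rates(qsos: List[Dict[str, Any]]) -> List[Dict[str, Any]]:
--     # Sort the extracted hours, then emit one record per run of equal hours
--     # (two-pointer run-length scan) instead of a defaultdict plus sorted-keys pass.
--     hours = sorted(h for q in qsos if (h := _hour(q.get('TIME_ON'))) is not None)
--     out = []
--     i = 0
--     n = len(hours)
--     while i < n:
--         j = i
--         while j < n and hours[j] == hours[i]:
--             j += 1
--         out.append({'hour': hours[i], 'qso_count': j - i})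
--         i = j
--     return out
-- ===== Notes on version B (the rewrite author's own statement) =====
-- stated objective: alternative
-- what changed: Replaces the defaultdict hash-counting pass plus sorted-keys output pass with a sort-then-run-length pipeline: the parsed hours are collected into a flat list, sorted, and a two-pointer scan emits one record per run of equal hours.
import Mathlib
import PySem

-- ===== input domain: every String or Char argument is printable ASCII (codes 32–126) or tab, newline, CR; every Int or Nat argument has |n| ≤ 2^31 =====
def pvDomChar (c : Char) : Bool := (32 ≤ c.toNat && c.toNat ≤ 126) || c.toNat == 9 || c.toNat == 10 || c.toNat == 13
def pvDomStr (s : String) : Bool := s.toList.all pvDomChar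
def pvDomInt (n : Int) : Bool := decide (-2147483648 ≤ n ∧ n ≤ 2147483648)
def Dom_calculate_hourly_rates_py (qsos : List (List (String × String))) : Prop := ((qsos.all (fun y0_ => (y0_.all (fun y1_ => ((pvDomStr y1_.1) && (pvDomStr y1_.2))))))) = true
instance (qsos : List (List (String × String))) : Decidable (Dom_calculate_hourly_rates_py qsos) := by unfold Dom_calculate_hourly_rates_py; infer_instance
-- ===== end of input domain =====

-- B replaces the defaultdict-count-then-sort-keys pipeline with sort-the-hours-then-run-length-scan
-- (same parsing of TIME_ON); objective: alternative decomposition, same results.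

-- shared parsing helper (both Pythons parse TIME_ON identically):
-- f"{n:06d}" — str(n) zero-padded to width 6, zeros after the sign. Exact for every Int
-- (Python pads with '0' between the sign and the digits up to total width 6).
def pvPad06 (n : Int) : List Char :=
  let cs := PySem.Int.toChars n
  if n < 0 then '-' :: (List.replicate (6 - cs.length) '0' ++ cs.tail)
  else List.replicate (6 - cs.length) '0' ++ cs

-- hour of one TIME_ON string: int(time_on) (None on ValueError = `continue`), then int(f"{t:06d}"[:2]).
-- The second int() never fails on the strings pvPad06 produces.
def pvHour? (t : String) : Option Int :=
  match PySem.Int.ofStr? t with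
  | none => none
  | some n => PySem.Int.ofChars? ((pvPad06 n).take 2)

-- qso.get('TIME_ON') then the parse above (None ⇒ skip)
def pvQsoHour? (q : List (String × String)) : Option Int :=
  match (PySem.Dict.mk q).get? "TIME_ON" with
  | none => none
  | some t => pvHour? t

-- ===== PORT A =====
def calculate_hourly_rates_py (qsos : List (List (String × String))) : List (List (String × Int)) :=
  if qsos = [] then []
  else
    -- hourly_counts = defaultdict(int); for qso in qsos: … hourly_counts[hour] += 1
    let hourly_counts : PySem.Dict Int Int :=
      qsos.foldl (fun d q =>
        match pvQsoHour? q with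
        | none => d
        | some hour => d.modify hour 0 (· + 1)) PySem.Dict.empty
    -- for hour in sorted(hourly_counts.keys()): append {'hour': hour, 'qso_count': hourly_counts[hour]}
    (PySem.List.sorted hourly_counts.keys (fun x => x) false).map
      (fun hour => [("hour", hour), ("qso_count", hourly_counts.getD hour 0)])

-- ===== PORT B =====
-- run-length scan of the sorted hour list (the two-pointer while loop of Source B:
-- j advances over the run of hours equal to hours[i], emits (hours[i], j - i), then i = j)
def pvGroupRuns : List Int → List (Int × Int)
  | [] => []
  | x :: xs =>
      (x, 1 + ((xs.takeWhile (· == x)).length : Int)) :: pvGroupRuns (xs.dropWhile (· == x))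
  termination_by l => l.length
  decreasing_by
    have := List.length_dropWhile_le (· == x) xs
    simp; omega

def calculate_hourly_rates_py_alt (qsos : List (List (String × String))) : List (List (String × Int)) :=
  -- hours = sorted(h for q in qsos if (h := _hour(q.get('TIME_ON'))) is not None)
  let hours : List Int := PySem.List.sorted (qsos.filterMap pvQsoHour?) (fun x => x) false
  (pvGroupRuns hours).map (fun p => [("hour", p.1), ("qso_count", p.2)])

-- ===== PRECONDITION & SPEC =====
def Spec_calculate_hourly_rates_py (qsos : List (List (String × String))) (out : List (List (String × Int))) : Prop := out = calculate_hourly_rates_py_alt qsos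
instance (qsos : List (List (String × String))) (out : List (List (String × Int))) : Decidable (Spec_calculate_hourly_rates_py qsos out) := by unfold Spec_calculate_hourly_rates_py; infer_instance

-- ===== CLAIM (what is proved, stated in full; the proofs are below) =====
def Claim_equal_calculate_hourly_rates_py : Prop := ∀ (qsos : List (List (String × String))), Dom_calculate_hourly_rates_py qsos → Spec_calculate_hourly_rates_py qsos (calculate_hourly_rates_py qsos)

-- ===== LEMMAS AND PROOFS =====

-- A's counting loop is the counter of the hour list
theorem pvFoldA_eq (l : List (List (String × String))) (d : PySem.Dict Int Int) :
    l.foldl (fun d q =>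
        match pvQsoHour? q with
        | none => d
        | some hour => d.modify hour 0 (· + 1)) d
      = (l.filterMap pvQsoHour?).foldl (fun d x => d.modify x 0 (· + 1)) d := by
  induction l generalizing d with
  | nil => rfl
  | cons q l ih =>
      cases h : pvQsoHour? q <;> simp [h, ih]

-- every element of xs.dropWhile (· == x) is strictly greater than x, when x :: xs is sorted
theorem pv_drop_gt (x : Int) (xs : List Int) (hp : (x :: xs).Pairwise (· ≤ ·)) :
    ∀ h ∈ xs.dropWhile (· == x), x < h := by
  induction xs with
  | nil => simp
  | cons y ys ih =>
      rcases List.pairwise_cons.1 hp with ⟨hx, hys⟩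
      by_cases hyx : y = x
      · subst hyx
        rw [List.dropWhile_cons_of_pos (by simp)]
        exact ih (List.pairwise_cons.2 ⟨fun z hz => hx z (List.mem_cons_of_mem _ hz),
          (List.pairwise_cons.1 hys).2⟩)
      · rw [List.dropWhile_cons_of_neg (by simpa using hyx)]
        intro h hh
        rcases List.mem_cons.1 hh with rfl | hh
        · exact lt_of_le_of_ne (hx h (List.mem_cons_self)) (fun e => hyx e.symm)
        · exact lt_of_lt_of_le
            (lt_of_le_of_ne (hx y List.mem_cons_self) (fun e => hyx e.symm))
            ((List.pairwise_cons.1 hys).1 h hh)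

-- the heads of the runs are exactly the elements (as a set)
theorem pv_mem_firsts (l : List Int) (h : Int) :
    h ∈ (pvGroupRuns l).map Prod.fst ↔ h ∈ l := by
  induction l using pvGroupRuns.induct with
  | case1 => simp [pvGroupRuns]
  | case2 x xs ih =>
      rw [pvGroupRuns]
      simp only [List.map_cons, List.mem_cons, ih]
      constructor
      · rintro (rfl | hd)
        · exact Or.inl rfl
        · exact Or.inr ((xs.dropWhile_sublist (· == x)).mem hd)
      · rintro (rfl | hm)
        · exact Or.inl rfl
        · rw [← List.takeWhile_append_dropWhile (p := (· == x)) (l := xs)] at hm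
          rcases List.mem_append.1 hm with ht | hd
          · exact Or.inl (by simpa using List.mem_takeWhile_imp ht)
          · exact Or.inr hd

-- on a sorted list the run heads are strictly increasing
theorem pv_firsts_lt (l : List Int) (hp : l.Pairwise (· ≤ ·)) :
    ((pvGroupRuns l).map Prod.fst).Pairwise (· < ·) := by
  induction l using pvGroupRuns.induct with
  | case1 => simp [pvGroupRuns]
  | case2 x xs ih =>
      rw [pvGroupRuns]
      refine List.pairwise_cons.2 ⟨?_, ih (List.Pairwise.sublist (xs.dropWhile_sublist (· == x)) hp.of_cons)⟩
      intro h hh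
      exact pv_drop_gt x xs hp h ((pv_mem_firsts _ h).1 hh)

-- on a sorted list, each run's length is the count of its head in the whole list
theorem pv_groupRuns_count (l : List Int) (hp : l.Pairwise (· ≤ ·)) :
    pvGroupRuns l = ((pvGroupRuns l).map Prod.fst).map (fun h => (h, (l.count h : Int))) := by
  induction l using pvGroupRuns.induct with
  | case1 => simp [pvGroupRuns]
  | case2 x xs ih =>
      have hgt := pv_drop_gt x xs hp
      have hsplit := List.takeWhile_append_dropWhile (p := (· == x)) (l := xs)
      rw [pvGroupRuns]
      simp only [List.map_cons]
      rw [List.cons_eq_cons]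
      constructor
      · -- the head run: count x (x :: xs) = 1 + |takeWhile (== x) xs|
        have hcx : xs.count x = (xs.takeWhile (· == x)).length := by
          have h1 : (xs.takeWhile (· == x)).count x = (xs.takeWhile (· == x)).length :=
            List.count_eq_length.2 (fun b hb => by
              have hb' : b = x := by simpa using List.mem_takeWhile_imp hb
              exact hb'.symm)
          have h2 : (xs.dropWhile (· == x)).count x = 0 :=
            List.count_eq_zero.2 (fun hc => lt_irrefl x (hgt x hc))
          conv_lhs => rw [← hsplit]
          rw [List.count_append, h1, h2, Nat.add_zero]
        simp [List.count_cons_self, hcx]; omega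
      · -- the tail runs: counts in the drop part equal counts in the whole list
        have ihd := ih (List.Pairwise.sublist (xs.dropWhile_sublist (· == x)) hp.of_cons)
        rw [ihd]
        simp only [List.map_map]
        apply List.map_congr_left
        intro h hh
        have hhd : h.1 ∈ xs.dropWhile (· == x) :=
          (pv_mem_firsts _ h.1).1 (List.mem_map_of_mem hh)
        have hxh : x < h.1 := hgt h.1 hhd
        have hct : (xs.takeWhile (· == x)).count h.1 = 0 :=
          List.count_eq_zero.2 (fun hc => absurd (List.mem_takeWhile_imp hc)
            (by simp; omega))
        have hce : (x :: xs).count h.1 = (xs.dropWhile (· == x)).count h.1 := by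
          rw [List.count_cons_of_ne (by omega)]
          conv_lhs => rw [← hsplit]
          rw [List.count_append, hct, Nat.zero_add]
        simp [Function.comp, hce]

-- ===== VERDICT (by name: the statement is the Claim_ definition above) =====
theorem calculate_hourly_rates_py_spec : Claim_equal_calculate_hourly_rates_py := by
  intro qsos _
  unfold Spec_calculate_hourly_rates_py calculate_hourly_rates_py calculate_hourly_rates_py_alt
  set H := qsos.filterMap pvQsoHour? with hH
  set S := PySem.List.sorted H (fun x => x) false with hS
  have hpS : S.Pairwise (· ≤ ·) := PySem.List.sorted_pairwise H (fun x => x)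
  by_cases hq : qsos = []
  · subst hq; simp [pvGroupRuns, PySem.List.sorted, hS, hH]
  · simp only [if_neg hq]
    rw [pvFoldA_eq, ← PySem.Dict.counter_eq_foldl, ← hH]
    -- sorted(counter keys) = run heads of S
    have hkeys : PySem.List.sorted (PySem.Dict.counter H).keys (fun x => x) false
        = (pvGroupRuns S).map Prod.fst := by
      rw [PySem.Dict.keys_counter]
      apply PySem.List.sorted_eq_of_perm_of_pairwise_lt
      · refine (List.perm_ext_iff_of_nodup ?_ ?_).2 ?_
        · exact ((pv_firsts_lt S hpS).imp (fun h => ne_of_lt h))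
        · rw [← PySem.List.dedup_eq_ofList]; exact PySem.List.nodup_dedup H
        · intro a
          rw [pv_mem_firsts, hS, PySem.List.mem_sorted, ← PySem.List.dedup_eq_ofList,
            PySem.List.mem_dedup]
      · exact pv_firsts_lt S hpS
    rw [hkeys]
    conv_rhs => rw [pv_groupRuns_count S hpS]
    rw [List.map_map, List.map_map, List.map_map]
    apply List.map_congr_left
    intro h _
    have hcnt : S.count h.1 = H.count h.1 := (PySem.List.sorted_perm H _ _).count_eq h.1
    simp [Function.comp, PySem.Dict.getD_counter, hcnt]
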